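-- pv_equiv track=rewrite | github.com/pypi-data/pypi-mirror-76 | packages/fourth/fourth-0.0.10-py3-none-any.whl/fourth/_internal.py | contains_timezone
-- ===== SOURCE A (Python) =====
-- def contains_timezone(format_string: str) -> bool:
--     """
--     Give an strftime style format string, check if it contains a %Z or %z timezone
--     format directive.
--
--     :param format_string: The format string to check.
--     :return: True if it does contain a timezone directive. False otherwise.
--     """
--     is_format_char = False  # if the current character is after a "%"
--
--     for character in format_string:
--         if is_format_char:
--             if character == "z" or character == "Z":
--                 return True
--             else:
--                 is_format_char = False
--         else:
--             if character == "%":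
--                 is_format_char = True
--
--     return False  # reached end of string without finding one, return False
-- ===== SOURCE B (Python) =====
-- def contains_timezone(format_string: str) -> bool:
--     """Two staged passes: (1) compute, per position, the length of the maximal
--     run of '%' characters ending there; (2) a 'z'/'Z' is a timezone directive
--     iff it is preceded by an ODD run of '%' (even runs are escaped %% pairs)."""
--     runs = []
--     prev = 0
--     for ch in format_string:
--         prev = prev + 1 if ch == "%" else 0
--         runs.append(prev)
--     return any(
--         ch in ("z", "Z") and run % 2 == 1
--         for ch, run in zip(format_string[1:], runs)
--     )
-- ===== Notes on version B (the rewrite author's own statement) =====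
-- stated objective: alternative
-- what changed: Replaced A's single-pass after-percent boolean state machine with two staged passes: a run-length pass recording the length of each maximal percent-sign run, then a zip/any pass declaring a z/Z a directive exactly when the percent run preceding it has odd length.
import Mathlib
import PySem

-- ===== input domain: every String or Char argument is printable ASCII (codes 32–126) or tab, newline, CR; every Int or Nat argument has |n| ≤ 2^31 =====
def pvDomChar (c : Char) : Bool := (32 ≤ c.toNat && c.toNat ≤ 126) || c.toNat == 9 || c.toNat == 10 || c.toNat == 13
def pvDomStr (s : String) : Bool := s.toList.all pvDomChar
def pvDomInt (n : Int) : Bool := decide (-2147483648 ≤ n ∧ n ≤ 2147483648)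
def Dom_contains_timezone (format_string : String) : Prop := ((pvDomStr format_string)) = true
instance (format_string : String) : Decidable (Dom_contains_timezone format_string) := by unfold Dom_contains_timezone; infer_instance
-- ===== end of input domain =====

-- B replaces A's single-pass after-% state machine with two staged passes
-- (run lengths of '%', then a zip/any parity test); alternative decomposition, same cost.

-- ===== PORT A =====
-- A's for-loop with early return: structural recursion over the characters,
-- carrying the is_format_char flag.
def ctzLoopA : List Char → Bool → Bool
  | [], _ => false
  | c :: rest, isFmt =>
    if isFmt then
      if c = 'z' ∨ c = 'Z' then true
      else ctzLoopA rest false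
    else
      if c = '%' then ctzLoopA rest true
      else ctzLoopA rest false

def contains_timezone (format_string : String) : Bool :=
  ctzLoopA format_string.toList false

-- ===== PORT B =====
-- Stage 1 of Source B: runs[i] = length of the maximal run of '%' ending at index i.
def pctRuns : List Char → Nat → List Nat
  | [], _ => []
  | c :: rest, prev =>
    let r := if c = '%' then prev + 1 else 0
    r :: pctRuns rest r

-- Stage 2 of Source B: any over zip(format_string[1:], runs); s[1:] is PySem.List.slice.
def contains_timezone_alt (format_string : String) : Bool :=
  let runs := pctRuns format_string.toList 0
  ((PySem.List.slice format_string.toList (some 1) none).zip runs).any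
    (fun p => (p.1 == 'z' || p.1 == 'Z') && p.2 % 2 == 1)

-- ===== PRECONDITION & SPEC =====
def Spec_contains_timezone (format_string : String) (out : Bool) : Prop := out = contains_timezone_alt format_string
instance (format_string : String) (out : Bool) : Decidable (Spec_contains_timezone format_string out) := by unfold Spec_contains_timezone; infer_instance

-- ===== CLAIM (what is proved, stated in full; the proofs are below) =====
def Claim_equal_contains_timezone : Prop := ∀ (format_string : String), Dom_contains_timezone format_string → Spec_contains_timezone format_string (contains_timezone format_string)

-- ===== LEMMAS AND PROOFS =====

-- A's flag equals "the '%'-run so far is odd"; with that, A's loop computes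
-- exactly B's fused zip/any over (char, run-before-it) pairs.
theorem ctz_main (l : List Char) (prev : Nat) :
    ctzLoopA l (decide (prev % 2 = 1)) =
      (l.zip (prev :: pctRuns l prev)).any
        (fun p => (p.1 == 'z' || p.1 == 'Z') && p.2 % 2 == 1) := by
  induction l generalizing prev with
  | nil => simp [ctzLoopA]
  | cons c rest ih =>
    by_cases hodd : prev % 2 = 1
    · by_cases hz : c = 'z' ∨ c = 'Z'
      · have hc : c ≠ '%' := by rcases hz with h | h <;> subst h <;> decide
        rcases hz with h | h <;> subst h <;>
          simp [ctzLoopA, pctRuns, hodd]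
      · have h0 : ctzLoopA rest false = ctzLoopA rest (decide (0 % 2 = 1)) := by norm_num
        by_cases hc : c = '%'
        · have h1 : ctzLoopA rest false = ctzLoopA rest (decide ((prev + 1) % 2 = 1)) := by
            have : (prev + 1) % 2 = 0 := by omega
            simp [this]
          subst hc
          simp only [ctzLoopA, pctRuns, hodd, decide_true, if_true, hz, if_false,
            List.zip_cons_cons, List.any_cons]
          simp only [h1, ih]
          simp
        · simp only [ctzLoopA, pctRuns, hodd, decide_true, if_true, hz, if_false,
            List.zip_cons_cons, List.any_cons]
          simp only [h0, ih]
          have hz' : ¬(c == 'z' || c == 'Z') = true := by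
            simp only [Bool.or_eq_true, beq_iff_eq]; exact hz
          simp [hc, hz']
    · have hflag : decide (prev % 2 = 1) = false := by simp [hodd]
      by_cases hc : c = '%'
      · have h1 : ctzLoopA rest true = ctzLoopA rest (decide ((prev + 1) % 2 = 1)) := by
          have : (prev + 1) % 2 = 1 := by omega
          simp [this]
        subst hc
        simp only [ctzLoopA, pctRuns, hflag, Bool.false_eq_true, if_false, if_true]
        simp only [h1, ih]
        simp [List.zip_cons_cons]
      · have h0 : ctzLoopA rest false = ctzLoopA rest (decide (0 % 2 = 1)) := by norm_num
        simp only [ctzLoopA, pctRuns, hflag, Bool.false_eq_true, if_false, hc]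
        simp only [h0, ih]
        simp [hodd, List.zip_cons_cons]

-- ===== VERDICT (by name: the statement is the Claim_ definition above) =====
theorem contains_timezone_spec : Claim_equal_contains_timezone := by
  intro s _
  unfold Spec_contains_timezone contains_timezone contains_timezone_alt
  have h := ctz_main s.toList 0
  norm_num at h
  rw [h, PySem.List.slice_from_one]
  cases s.toList with
  | nil => simp
  | cons c rest => simp [pctRuns, List.zip_cons_cons]
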